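-- pv_equiv track=rewrite | github.com/rowanhm/ChainNet | python/u4_updating/s2_sanity_check.py | is_valid_forest
-- ===== SOURCE A (Python) =====
-- from collections import defaultdict
--
-- def is_valid_forest(edges):
--     # Build adjacency list and in-degree count
--     graph = defaultdict(set)
--     in_degree = defaultdict(int)
--     nodes = set()
--
--     for a, b in edges:
--         if b in graph[a]:  # Prevent duplicate edges
--             continue
--         graph[a].add(b)
--         in_degree[b] += 1
--         nodes.add(a)
--         nodes.add(b)
--
--     # Find roots (nodes with in-degree 0)
--     roots = {node for node in nodes if in_degree[node] == 0}
--
--     if not roots: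
--         return False  # No roots means there is a cycle
--
--     visited = set()
--
--     # DFS to check for cycles and connectivity
--     def dfs(node):
--         if node in visited:
--             return False  # Cycle detected
--         visited.add(node)
--         for neighbor in graph[node]:
--             if not dfs(neighbor):
--                 return False
--         return True
--
--     # Check each tree separately
--     for root in roots:
--         if not dfs(root):
--             return False
--
--     # Ensure all nodes are visited (no disconnected cycles)
--     return len(visited) == len(nodes)
-- ===== SOURCE B (Python) =====
-- def is_valid_forest(edges):
--     # Parent-pointer validation: a forest = every node has at most one parent
--     # and every parent chain terminates at a parentless node (no cycles).
--     parent = {}          # child -> its unique parent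
--     nodes = set()
--     for a, b in edges:
--         nodes.add(a)
--         nodes.add(b)
--         if b in parent:
--             if parent[b] != a:
--                 return False       # two distinct parents for b
--         else:
--             parent[b] = a
--     if not nodes:
--         return False
--     n = len(nodes)
--     ok = set()           # nodes whose parent chain is known to reach a root
--     for v in nodes:
--         trail = []
--         steps = 0
--         while v in parent and v not in ok:
--             trail.append(v)
--             v = parent[v]
--             steps += 1
--             if steps > n:
--                 return False       # walked longer than the node count: cycle
--         ok.add(v)
--         ok.update(trail)
--     return True
-- ===== Notes on version B (the rewrite author's own statement) =====
-- stated objective: alternative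
-- what changed: A validates the forest by building child-adjacency sets plus in-degrees and running a recursive DFS from all roots with a visited-set revisit check; B instead builds a child->parent pointer map (rejecting a second distinct parent on the spot) and iteratively walks each node's parent chain with a step counter and a memo set, declaring a cycle when a chain exceeds the node count.
import Mathlib
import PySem

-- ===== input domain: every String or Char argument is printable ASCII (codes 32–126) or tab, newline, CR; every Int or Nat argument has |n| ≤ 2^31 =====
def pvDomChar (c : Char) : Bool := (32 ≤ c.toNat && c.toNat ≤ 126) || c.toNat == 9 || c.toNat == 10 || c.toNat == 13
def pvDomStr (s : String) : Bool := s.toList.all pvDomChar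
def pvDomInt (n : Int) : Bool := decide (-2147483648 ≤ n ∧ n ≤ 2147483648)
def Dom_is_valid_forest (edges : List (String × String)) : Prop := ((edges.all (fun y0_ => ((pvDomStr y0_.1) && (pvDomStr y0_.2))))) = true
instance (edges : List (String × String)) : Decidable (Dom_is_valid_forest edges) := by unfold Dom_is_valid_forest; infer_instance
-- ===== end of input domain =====

-- B replaces A's recursive root-DFS with iterative parent-pointer chain walking (alternative algorithm, same return value).

-- ===== PORT A =====
-- one step of A's build loop: dedup edge, adjacency set, in-degree count, node set
def pvStepA (st : (PySem.Dict String (PySem.Set String)) × (PySem.Dict String Int) × PySem.Set String)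
    (e : String × String) :
    (PySem.Dict String (PySem.Set String)) × (PySem.Dict String Int) × PySem.Set String :=
  if e.2 ∈ st.1.getD e.1 PySem.Set.empty then st
  else (st.1.insert e.1 ((st.1.getD e.1 PySem.Set.empty).add e.2),
        st.2.1.modify e.2 0 (· + 1),
        (st.2.2.add e.1).add e.2)

-- A's recursive `dfs`, run over a worklist: first the roots, then (recursively, at one
-- less fuel) each node's neighbour set.  Fuel only bounds recursion depth; is_valid_forest
-- passes fuel larger than the node count, so the 0-fuel branch is never reached.
def pvDfsA (g : PySem.Dict String (PySem.Set String)) :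
    Nat → List String → PySem.Set String → Bool × PySem.Set String
  | _, [], vis => (true, vis)
  | 0, _ :: _, vis => (false, vis)
  | f+1, n :: rest, vis =>
    if n ∈ vis then (false, vis)
    else
      match pvDfsA g f (g.getD n PySem.Set.empty) (vis.add n) with
      | (false, vis') => (false, vis')
      | (true, vis') => pvDfsA g (f+1) rest vis'
  termination_by f ns _ => (f, ns.length)

def is_valid_forest (edges : List (String × String)) : Bool :=
  let st := edges.foldl pvStepA (PySem.Dict.empty, PySem.Dict.empty, PySem.Set.empty)
  let roots : PySem.Set String := st.2.2.filter (fun v => st.2.1.getD v 0 == 0)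
  if roots.isEmpty then false
  else
    match pvDfsA st.1 (2 * edges.length + 2) roots PySem.Set.empty with
    | (false, _) => false
    | (true, visited) => visited.length == st.2.2.length

-- ===== PORT B =====
-- B's build loop: parent map (child -> unique parent) and node set; none = early False
def pvBuildB : List (String × String) → PySem.Dict String String → PySem.Set String →
    Option (PySem.Dict String String × PySem.Set String)
  | [], parent, nodes => some (parent, nodes)
  | (a, b) :: rest, parent, nodes =>
    let nodes' := (nodes.add a).add b
    match parent.get? b with
    | some a0 => if a0 ≠ a then none else pvBuildB rest parent nodes'
    | none => pvBuildB rest (parent.insert b a) nodes'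

-- B's inner while loop: walk the parent chain from v, collecting the trail;
-- none = more than n steps (cycle), some = reached a parentless or known-ok node.
def pvWalk (parent : PySem.Dict String String) (ok : PySem.Set String) (n : Nat) :
    String → Nat → List String → Option (List String)
  | v, steps, trail =>
    match parent.get? v with
    | none => some (v :: trail)
    | some u =>
      if v ∈ ok then some (v :: trail)
      else if n < steps + 1 then none
      else pvWalk parent ok n u (steps + 1) (v :: trail)
  termination_by v steps _ => n + 1 - steps

-- B's outer loop over the nodes, accumulating the ok set
def pvCheckAll (parent : PySem.Dict String String) (n : Nat) :
    List String → PySem.Set String → Bool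
  | [], _ => true
  | v :: rest, ok =>
    match pvWalk parent ok n v 0 [] with
    | none => false
    | some trail => pvCheckAll parent n rest (ok.update trail)

def is_valid_forest_alt (edges : List (String × String)) : Bool :=
  match pvBuildB edges PySem.Dict.empty PySem.Set.empty with
  | none => false
  | some (parent, nodes) =>
    if nodes.isEmpty then false
    else pvCheckAll parent nodes.length nodes PySem.Set.empty

-- ===== PRECONDITION & SPEC =====
def Spec_is_valid_forest (edges : List (String × String)) (out : Bool) : Prop := out = is_valid_forest_alt edges
instance (edges : List (String × String)) (out : Bool) : Decidable (Spec_is_valid_forest edges out) := by unfold Spec_is_valid_forest; infer_instance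

-- ===== CLAIM (what is proved, stated in full; the proofs are below) =====
def Claim_equal_is_valid_forest : Prop := ∀ (edges : List (String × String)), Dom_is_valid_forest edges → Spec_is_valid_forest edges (is_valid_forest edges)

-- ===== LEMMAS AND PROOFS =====

-- abbreviation used throughout the proofs: A's adjacency sets
def pvAdj (g : PySem.Dict String (PySem.Set String)) (u : String) : PySem.Set String :=
  g.getD u PySem.Set.empty

-- "the parent chain from v reaches a parentless node" (w.r.t. B's parent map)
inductive PvGood (p : PySem.Dict String String) : String → Prop
  | root (v : String) : p.get? v = none → PvGood p v
  | step (v u : String) : p.get? v = some u → PvGood p u → PvGood p v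

-- k steps along the parent chain (none = fell off a parentless node on the way)
def pvChain (p : PySem.Dict String String) : Nat → String → Option String
  | 0, v => some v
  | k+1, v => match p.get? v with
    | none => none
    | some u => pvChain p k u

lemma pvChain_succ_right (p : PySem.Dict String String) (k : Nat) :
    ∀ v, pvChain p (k+1) v = (pvChain p k v).bind (fun x => p.get? x) := by
  induction k with
  | zero => intro v; simp [pvChain]; cases p.get? v <;> simp
  | succ k ih =>
    intro v
    rw [show k + 1 + 1 = (k + 1) + 1 from rfl]
    simp only [pvChain]
    cases h : p.get? v with
    | none => simp
    | some u => simpa using ih u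

lemma pvGood_no_cycle {p : PySem.Dict String String} {x : String} (hg : PvGood p x) :
    ∀ m, 1 ≤ m → pvChain p m x = some x → False := by
  induction hg with
  | root v hv =>
    intro m hm hc
    cases m with
    | zero => omega
    | succ k => simp [pvChain, hv] at hc
  | step v u hv _ ih =>
    intro m hm hc
    cases m with
    | zero => omega
    | succ k =>
      have hcu : pvChain p k u = some v := by simpa [pvChain, hv] using hc
      have : pvChain p (k+1) u = some u := by
        rw [pvChain_succ_right]
        simp [hcu, hv]
      exact ih (k+1) (by omega) this

-- ---------- A-side: the build fold ----------

lemma pvFoldA_main : ∀ (es : List (String × String))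
    (g : PySem.Dict String (PySem.Set String)) (i : PySem.Dict String Int) (nd : PySem.Set String),
    nd.Nodup → (∀ u, (pvAdj g u).Nodup) →
    (∀ u v, v ∈ pvAdj g u → u ∈ nd ∧ v ∈ nd) →
    (∀ v, 0 ≤ i.getD v 0) →
    (∀ v, i.getD v 0 = 0 ↔ ∀ u, v ∉ pvAdj g u) →
    (es.foldl pvStepA (g, i, nd)).2.2.Nodup ∧
    (∀ u, (pvAdj (es.foldl pvStepA (g, i, nd)).1 u).Nodup) ∧
    (∀ u v, v ∈ pvAdj (es.foldl pvStepA (g, i, nd)).1 u ↔ v ∈ pvAdj g u ∨ (u, v) ∈ es) ∧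
    (∀ v, v ∈ (es.foldl pvStepA (g, i, nd)).2.2 ↔ v ∈ nd ∨ ∃ e ∈ es, v = e.1 ∨ v = e.2) ∧
    (∀ u v, v ∈ pvAdj (es.foldl pvStepA (g, i, nd)).1 u →
        u ∈ (es.foldl pvStepA (g, i, nd)).2.2 ∧ v ∈ (es.foldl pvStepA (g, i, nd)).2.2) ∧
    (∀ v, (es.foldl pvStepA (g, i, nd)).2.1.getD v 0 = 0 ↔
        ∀ u, v ∉ pvAdj (es.foldl pvStepA (g, i, nd)).1 u) := by
  intro es
  induction es with
  | nil =>
    intro g i nd h1 h2 h3 h4 h5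
    refine ⟨h1, h2, ?_, ?_, ?_, h5⟩
    · intro u v; simp
    · intro v; simp
    · intro u v hv; exact h3 u v hv
  | cons e rest ih =>
    intro g i nd h1 h2 h3 h4 h5
    rcases e with ⟨a, b⟩
    simp only [List.foldl_cons]
    by_cases hdup : b ∈ g.getD a PySem.Set.empty
    · have hstep : pvStepA (g, i, nd) (a, b) = (g, i, nd) := by
        unfold pvStepA
        exact if_pos hdup
      rw [hstep]
      rcases ih g i nd h1 h2 h3 h4 h5 with ⟨c1, c2, c3, c4, c5, c6⟩
      refine ⟨c1, c2, ?_, ?_, c5, c6⟩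
      · intro u v
        rw [c3 u v]
        constructor
        · rintro (hv | hv)
          · exact Or.inl hv
          · exact Or.inr (by simp [hv])
        · rintro (hv | hv)
          · exact Or.inl hv
          · rcases List.mem_cons.1 hv with heq | hv
            · have h1e : u = a := congrArg Prod.fst heq
              have h2e : v = b := congrArg Prod.snd heq
              subst h1e; subst h2e
              exact Or.inl hdup
            · exact Or.inr hv
      · intro v
        rw [c4 v]
        constructor
        · rintro (hv | ⟨e, he, hor⟩)
          · exact Or.inl hv
          · exact Or.inr ⟨e, by simp [he], hor⟩
        · rintro (hv | ⟨e, he, hor⟩)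
          · exact Or.inl hv
          · rcases List.mem_cons.1 he with heq | he
            · subst heq
              rcases h3 a b hdup with ⟨ha, hb⟩
              rcases hor with h | h
              · exact Or.inl (h ▸ ha)
              · exact Or.inl (h ▸ hb)
            · exact Or.inr ⟨e, he, hor⟩
    · have hstep : pvStepA (g, i, nd) (a, b)
          = (g.insert a ((g.getD a PySem.Set.empty).add b), i.modify b 0 (· + 1), (nd.add a).add b) := by
        unfold pvStepA
        exact if_neg hdup
      rw [hstep]
      -- facts about the new state
      have hadj' : ∀ u, pvAdj (g.insert a ((g.getD a PySem.Set.empty).add b)) u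
          = if u = a then (g.getD a PySem.Set.empty).add b else pvAdj g u := by
        intro u
        simp [pvAdj, PySem.Dict.getD_insert]
      have hmem' : ∀ u v, v ∈ pvAdj (g.insert a ((g.getD a PySem.Set.empty).add b)) u
          ↔ v ∈ pvAdj g u ∨ (u = a ∧ v = b) := by
        intro u v
        rw [hadj']
        by_cases hua : u = a
        · subst hua
          simp [PySem.Set.mem_add, pvAdj]
        · simp [hua]
      have hndsub : ∀ v, v ∈ nd → v ∈ (nd.add a).add b := by
        intro v hv
        exact (PySem.Set.mem_add _ _ _).2 (Or.inl ((PySem.Set.mem_add _ _ _).2 (Or.inl hv)))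
      have han : a ∈ (nd.add a).add b :=
        (PySem.Set.mem_add _ _ _).2 (Or.inl ((PySem.Set.mem_add _ _ _).2 (Or.inr rfl)))
      have hbn : b ∈ (nd.add a).add b := (PySem.Set.mem_add _ _ _).2 (Or.inr rfl)
      rcases ih (g.insert a ((g.getD a PySem.Set.empty).add b)) (i.modify b 0 (· + 1)) ((nd.add a).add b)
        (PySem.Set.nodup_add _ b (PySem.Set.nodup_add nd a h1))
        (by
          intro u
          rw [hadj']
          by_cases hua : u = a
          · simp only [if_pos hua]
            exact PySem.Set.nodup_add _ b (h2 a)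
          · simp only [if_neg hua]
            exact h2 u)
        (by
          intro u v hv
          rcases (hmem' u v).1 hv with hv | ⟨rfl, rfl⟩
          · rcases h3 u v hv with ⟨hu', hv'⟩
            exact ⟨hndsub u hu', hndsub v hv'⟩
          · exact ⟨han, hbn⟩)
        (by
          intro v
          rw [PySem.Dict.getD_modify]
          by_cases hvb : v = b
          · simp only [if_pos hvb]
            have := h4 b
            omega
          · simp only [if_neg hvb]
            exact h4 v)
        (by
          intro v
          rw [PySem.Dict.getD_modify]
          by_cases hvb : v = b
          · subst hvb
            simp only [if_pos]
            constructor
            · intro hc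
              have := h4 v
              simp at hc
              omega
            · intro hall
              exact absurd ((hmem' a v).2 (Or.inr ⟨rfl, rfl⟩)) (hall a)
          · simp only [if_neg hvb]
            rw [h5 v]
            constructor
            · intro hall u hv
              rcases (hmem' u v).1 hv with hv | ⟨rfl, rfl⟩
              · exact hall u hv
              · exact hvb rfl
            · intro hall u hv
              exact hall u ((hmem' u v).2 (Or.inl hv)))
        with ⟨c1, c2, c3, c4, c5, c6⟩
      refine ⟨c1, c2, ?_, ?_, c5, c6⟩
      · intro u v
        rw [c3 u v]
        constructor
        · rintro (hv | hv)
          · rcases (hmem' u v).1 hv with hv | ⟨rfl, rfl⟩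
            · exact Or.inl hv
            · exact Or.inr (by simp)
          · exact Or.inr (by simp [hv])
        · rintro (hv | hv)
          · exact Or.inl ((hmem' u v).2 (Or.inl hv))
          · rcases List.mem_cons.1 hv with heq | hv
            · exact Or.inl ((hmem' u v).2 (Or.inr ⟨congrArg Prod.fst heq, congrArg Prod.snd heq⟩))
            · exact Or.inr hv
      · intro v
        rw [c4 v]
        constructor
        · rintro (hv | ⟨e, he, hor⟩)
          · rcases (PySem.Set.mem_add _ _ _).1 hv with hv | rfl
            · rcases (PySem.Set.mem_add _ _ _).1 hv with hv | rfl
              · exact Or.inl hv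
              · exact Or.inr ⟨(v, b), by simp, Or.inl rfl⟩
            · exact Or.inr ⟨(a, v), by simp, Or.inr rfl⟩
          · exact Or.inr ⟨e, by simp [he], hor⟩
        · rintro (hv | ⟨e, he, hor⟩)
          · exact Or.inl (hndsub v hv)
          · rcases List.mem_cons.1 he with heq | he
            · subst heq
              rcases hor with h | h
              · exact Or.inl (h ▸ han)
              · exact Or.inl (h ▸ hbn)
            · exact Or.inr ⟨e, he, hor⟩

-- ---------- B-side: the build fold ----------

lemma pvBuildB_main : ∀ (es : List (String × String))
    (p : PySem.Dict String String) (nd : PySem.Set String), nd.Nodup →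
    (pvBuildB es p nd = none →
      ∃ a a' b, a ≠ a' ∧ (a, b) ∈ es ∧ (p.get? b = some a' ∨ (a', b) ∈ es)) ∧
    (∀ p' nd', pvBuildB es p nd = some (p', nd') →
      (∀ a b, (a, b) ∈ es → p'.get? b = some a) ∧
      (∀ b a, p'.get? b = some a → p.get? b = some a ∨ (a, b) ∈ es) ∧
      (∀ b a, p.get? b = some a → p'.get? b = some a) ∧
      (∀ v, v ∈ nd' ↔ v ∈ nd ∨ ∃ e ∈ es, v = e.1 ∨ v = e.2) ∧ nd'.Nodup) := by
  intro es
  induction es with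
  | nil =>
    intro p nd hnd
    constructor
    · intro h; simp [pvBuildB] at h
    · intro p' nd' h
      simp only [pvBuildB] at h
      cases h
      refine ⟨by simp, fun b a h => Or.inl h, fun b a h => h, by simp, hnd⟩
  | cons e rest ih =>
    intro p nd hnd
    rcases e with ⟨a, b⟩
    have hnd' : ((nd.add a).add b).Nodup := PySem.Set.nodup_add _ b (PySem.Set.nodup_add nd a hnd)
    have hndmem : ∀ v, v ∈ (nd.add a).add b ↔ v ∈ nd ∨ v = a ∨ v = b := by
      intro v
      rw [PySem.Set.mem_add, PySem.Set.mem_add]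
      tauto
    cases h0 : p.get? b with
    | some a0 =>
      by_cases ha : a0 = a
      · subst ha
        have hred : pvBuildB ((a0, b) :: rest) p nd = pvBuildB rest p ((nd.add a0).add b) := by
          rw [pvBuildB]
          simp [h0]
        rcases ih p ((nd.add a0).add b) hnd' with ⟨ihn, ihs⟩
        constructor
        · intro h
          rw [hred] at h
          rcases ihn h with ⟨x, y, c, hne, hmem, hor⟩
          refine ⟨x, y, c, hne, by simp [hmem], ?_⟩
          rcases hor with h | h
          · exact Or.inl h
          · exact Or.inr (by simp [h])
        · intro p' nd' h
          rw [hred] at h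
          rcases ihs p' nd' h with ⟨c1, c2, c5, c3, c4⟩
          refine ⟨?_, ?_, c5, ?_, c4⟩
          · intro x y hy
            rcases List.mem_cons.1 hy with heq | hy
            · have h1e : x = a0 := congrArg Prod.fst heq
              have h2e : y = b := congrArg Prod.snd heq
              subst h1e; subst h2e
              exact c5 y x h0
            · exact c1 x y hy
          · intro y x h
            rcases c2 y x h with h | h
            · exact Or.inl h
            · exact Or.inr (by simp [h])
          · intro v
            rw [c3 v, hndmem v]
            constructor
            · rintro ((hv | hv | hv) | ⟨e, he, hor⟩)
              · exact Or.inl hv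
              · exact Or.inr ⟨(a0, b), by simp, Or.inl hv⟩
              · exact Or.inr ⟨(a0, b), by simp, Or.inr hv⟩
              · exact Or.inr ⟨e, by simp [he], hor⟩
            · rintro (hv | ⟨e, he, hor⟩)
              · exact Or.inl (Or.inl hv)
              · rcases List.mem_cons.1 he with heq | he
                · subst heq
                  rcases hor with h | h
                  · exact Or.inl (Or.inr (Or.inl h))
                  · exact Or.inl (Or.inr (Or.inr h))
                · exact Or.inr ⟨e, he, hor⟩
      · have hred : pvBuildB ((a, b) :: rest) p nd = none := by
          rw [pvBuildB]
          simp [h0, ha]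
        constructor
        · intro _
          exact ⟨a, a0, b, fun hc => ha (hc.symm), by simp, Or.inl h0⟩
        · intro p' nd' h
          rw [hred] at h
          cases h
    | none =>
      have hred : pvBuildB ((a, b) :: rest) p nd = pvBuildB rest (p.insert b a) ((nd.add a).add b) := by
        rw [pvBuildB]
        simp [h0]
      rcases ih (p.insert b a) ((nd.add a).add b) hnd' with ⟨ihn, ihs⟩
      have hins : ∀ y x, (p.insert b a).get? y = some x ↔ (y = b ∧ x = a) ∨ (y ≠ b ∧ p.get? y = some x) := by
        intro y x
        rw [PySem.Dict.get?_insert]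
        by_cases hyb : y = b
        · simp [hyb]; tauto
        · simp [hyb]
      constructor
      · intro h
        rw [hred] at h
        rcases ihn h with ⟨x, y, c, hne, hmem, hor⟩
        rcases hor with h | h
        · rcases (hins c y).1 h with ⟨rfl, rfl⟩ | ⟨hcb, hp⟩
          · exact ⟨x, y, c, hne, by simp [hmem], Or.inr (by simp)⟩
          · exact ⟨x, y, c, hne, by simp [hmem], Or.inl hp⟩
        · exact ⟨x, y, c, hne, by simp [hmem], Or.inr (by simp [h])⟩
      · intro p' nd' h
        rw [hred] at h
        rcases ihs p' nd' h with ⟨c1, c2, c5, c3, c4⟩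
        refine ⟨?_, ?_, ?_, ?_, c4⟩
        · intro x y hy
          rcases List.mem_cons.1 hy with heq | hy
          · have h1e : x = a := congrArg Prod.fst heq
            have h2e : y = b := congrArg Prod.snd heq
            subst h1e; subst h2e
            exact c5 y x ((hins y x).2 (Or.inl ⟨rfl, rfl⟩))
          · exact c1 x y hy
        · intro y x h
          rcases c2 y x h with h | h
          · rcases (hins y x).1 h with ⟨rfl, rfl⟩ | ⟨hyb, hp⟩
            · exact Or.inr (by simp)
            · exact Or.inl hp
          · exact Or.inr (by simp [h])
        · intro y x h
          have hyb : y ≠ b := by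
            intro hc; rw [hc] at h; rw [h0] at h; cases h
          exact c5 y x ((hins y x).2 (Or.inr ⟨hyb, h⟩))
        · intro v
          rw [c3 v, hndmem v]
          constructor
          · rintro ((hv | hv | hv) | ⟨e, he, hor⟩)
            · exact Or.inl hv
            · exact Or.inr ⟨(a, b), by simp, Or.inl hv⟩
            · exact Or.inr ⟨(a, b), by simp, Or.inr hv⟩
            · exact Or.inr ⟨e, by simp [he], hor⟩
          · rintro (hv | ⟨e, he, hor⟩)
            · exact Or.inl (Or.inl hv)
            · rcases List.mem_cons.1 he with heq | he
              · subst heq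
                rcases hor with h | h
                · exact Or.inl (Or.inr (Or.inl h))
                · exact Or.inl (Or.inr (Or.inr h))
              · exact Or.inr ⟨e, he, hor⟩

-- ---------- A-side: the DFS worklist ----------

lemma pvDfs_mono (g : PySem.Dict String (PySem.Set String)) :
    ∀ f ns vis, ∀ x ∈ vis, x ∈ (pvDfsA g f ns vis).2 := by
  intro f ns vis
  induction f, ns, vis using pvDfsA.induct g with
  | case1 f vis => simp [pvDfsA]
  | case2 head tail vis => simp [pvDfsA]
  | case3 f n rest vis h => simp [pvDfsA, h]
  | case4 f n rest vis h vis' hrun ih =>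
    intro x hx
    have e2 : (pvDfsA g f (g.getD n PySem.Set.empty) (vis.add n)).2 = vis' := by rw [hrun]
    simp only [pvDfsA, if_neg h, hrun]
    exact e2 ▸ ih x (by simp [PySem.Set.mem_add, hx])
  | case5 f n rest vis h vis' hrun ih1 ih2 =>
    intro x hx
    have e2 : (pvDfsA g f (g.getD n PySem.Set.empty) (vis.add n)).2 = vis' := by rw [hrun]
    simp only [pvDfsA, if_neg h, hrun]
    exact ih2 x (e2 ▸ ih1 x (by simp [PySem.Set.mem_add, hx]))

lemma pvDfs_nodup (g : PySem.Dict String (PySem.Set String)) :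
    ∀ f ns vis, vis.Nodup → (pvDfsA g f ns vis).2.Nodup := by
  intro f ns vis
  induction f, ns, vis using pvDfsA.induct g with
  | case1 f vis => simp [pvDfsA]
  | case2 head tail vis => simp [pvDfsA]
  | case3 f n rest vis h => simp [pvDfsA, h]
  | case4 f n rest vis h vis' hrun ih =>
    intro hnd
    have e2 : (pvDfsA g f (g.getD n PySem.Set.empty) (vis.add n)).2 = vis' := by rw [hrun]
    simp only [pvDfsA, if_neg h, hrun]
    exact e2 ▸ ih (PySem.Set.nodup_add vis n hnd)
  | case5 f n rest vis h vis' hrun ih1 ih2 =>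
    intro hnd
    have e2 : (pvDfsA g f (g.getD n PySem.Set.empty) (vis.add n)).2 = vis' := by rw [hrun]
    simp only [pvDfsA, if_neg h, hrun]
    exact ih2 (e2 ▸ ih1 (PySem.Set.nodup_add vis n hnd))

lemma pvDfs_subset (g : PySem.Dict String (PySem.Set String)) (S : List String)
    (hadj : ∀ u x, x ∈ pvAdj g u → x ∈ S) :
    ∀ f ns vis, (∀ x ∈ ns, x ∈ S) → (∀ x ∈ vis, x ∈ S) →
    ∀ x ∈ (pvDfsA g f ns vis).2, x ∈ S := by
  intro f ns vis
  induction f, ns, vis using pvDfsA.induct g with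
  | case1 f vis => intro _ hv; simpa [pvDfsA] using hv
  | case2 head tail vis => intro _ hv; simpa [pvDfsA] using hv
  | case3 f n rest vis h => intro _ hv; simpa [pvDfsA, h] using hv
  | case4 f n rest vis h vis' hrun ih =>
    intro hns hvis x hx
    have e2 : (pvDfsA g f (g.getD n PySem.Set.empty) (vis.add n)).2 = vis' := by rw [hrun]
    simp only [pvDfsA, if_neg h, hrun] at hx
    refine ih (fun y hy => hadj n y hy) (fun y hy => ?_) x (by rw [e2]; exact hx)
    rcases (PySem.Set.mem_add _ _ _).1 hy with hy | rfl
    · exact hvis y hy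
    · exact hns y (by simp)
  | case5 f n rest vis h vis' hrun ih1 ih2 =>
    intro hns hvis x hx
    have e2 : (pvDfsA g f (g.getD n PySem.Set.empty) (vis.add n)).2 = vis' := by rw [hrun]
    simp only [pvDfsA, if_neg h, hrun] at hx
    refine ih2 (fun y hy => hns y (by simp [hy])) (fun y hy => ?_) x hx
    refine ih1 (fun z hz => hadj n z hz) (fun z hz => ?_) y (by rw [e2]; exact hy)
    rcases (PySem.Set.mem_add _ _ _).1 hz with hz | rfl
    · exact hvis z hz
    · exact hns z (by simp)

lemma pvDfs_entry (g : PySem.Dict String (PySem.Set String)) :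
    ∀ f ns vis, ∀ x ∈ (pvDfsA g f ns vis).2,
      x ∈ vis ∨ x ∈ ns ∨ ∃ u, u ∈ (pvDfsA g f ns vis).2 ∧ u ∉ vis ∧ x ∈ pvAdj g u := by
  intro f ns vis
  induction f, ns, vis using pvDfsA.induct g with
  | case1 f vis => intro x hx; simp [pvDfsA] at hx; exact Or.inl hx
  | case2 head tail vis => intro x hx; simp [pvDfsA] at hx; exact Or.inl hx
  | case3 f n rest vis h => intro x hx; simp [pvDfsA, h] at hx; exact Or.inl hx
  | case4 f n rest vis h vis' hrun ih =>
    intro x hx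
    have e2 : (pvDfsA g f (g.getD n PySem.Set.empty) (vis.add n)).2 = vis' := by rw [hrun]
    simp only [pvDfsA, if_neg h, hrun] at hx ⊢
    rcases ih x (by rw [e2]; exact hx) with hv | hn | ⟨u, hu1, hu2, hu3⟩
    · rcases (PySem.Set.mem_add _ _ _).1 hv with hv | rfl
      · exact Or.inl hv
      · exact Or.inr (Or.inl (by simp))
    · refine Or.inr (Or.inr ⟨n, ?_, h, hn⟩)
      have : n ∈ PySem.Set.add vis n := by simp [PySem.Set.mem_add]
      exact e2 ▸ pvDfs_mono g f (g.getD n PySem.Set.empty) (vis.add n) n this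
    · refine Or.inr (Or.inr ⟨u, e2 ▸ hu1, fun hc => hu2 (by simp [PySem.Set.mem_add, hc]), hu3⟩)
  | case5 f n rest vis h vis' hrun ih1 ih2 =>
    intro x hx
    have e2 : (pvDfsA g f (g.getD n PySem.Set.empty) (vis.add n)).2 = vis' := by rw [hrun]
    simp only [pvDfsA, if_neg h, hrun] at hx ⊢
    have hsub : ∀ y, y ∈ PySem.Set.add vis n → y ∈ (pvDfsA g (f+1) rest vis').2 := fun y hy =>
      pvDfs_mono g (f+1) rest vis' y (e2 ▸ pvDfs_mono g f (g.getD n PySem.Set.empty) (vis.add n) y hy)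
    rcases ih2 x hx with hv | hn | ⟨u, hu1, hu2, hu3⟩
    · -- x ∈ vis'
      rcases ih1 x (by rw [e2]; exact hv) with hv1 | hn1 | ⟨u, hu1, hu2, hu3⟩
      · rcases (PySem.Set.mem_add _ _ _).1 hv1 with hv1 | rfl
        · exact Or.inl hv1
        · exact Or.inr (Or.inl (by simp))
      · exact Or.inr (Or.inr ⟨n, hsub n (by simp [PySem.Set.mem_add]), h, hn1⟩)
      · refine Or.inr (Or.inr ⟨u, ?_, fun hc => hu2 (by simp [PySem.Set.mem_add, hc]), hu3⟩)
        exact pvDfs_mono g (f+1) rest vis' u (e2 ▸ hu1)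
    · exact Or.inr (Or.inl (by simp [hn]))
    · -- u ∈ run2 output, u ∉ vis'
      refine Or.inr (Or.inr ⟨u, hu1, fun hc => hu2 (e2 ▸ pvDfs_mono g f (g.getD n PySem.Set.empty) (vis.add n) u (by simp [PySem.Set.mem_add, hc])), hu3⟩)

lemma pvDfs_true_ns (g : PySem.Dict String (PySem.Set String)) :
    ∀ f ns vis out, pvDfsA g f ns vis = (true, out) → ∀ n ∈ ns, n ∈ out ∧ n ∉ vis := by
  intro f ns vis
  induction f, ns, vis using pvDfsA.induct g with
  | case1 f vis => intro out hout n hn; simp at hn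
  | case2 head tail vis => intro out hout; simp [pvDfsA] at hout
  | case3 f n rest vis h => intro out hout; simp [pvDfsA, h] at hout
  | case4 f n rest vis h vis' hrun ih =>
    intro out hout
    simp only [pvDfsA, if_neg h, hrun] at hout
    simp at hout
  | case5 f n rest vis h vis' hrun ih1 ih2 =>
    intro out hout m hm
    have e2 : (pvDfsA g f (g.getD n PySem.Set.empty) (vis.add n)).2 = vis' := by rw [hrun]
    simp only [pvDfsA, if_neg h, hrun] at hout
    have hvsub : ∀ y, y ∈ vis.add n → y ∈ out := by
      intro y hy
      have h1 := pvDfs_mono g f (g.getD n PySem.Set.empty) (vis.add n) y hy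
      rw [e2] at h1
      have h2 := pvDfs_mono g (f+1) rest vis' y h1
      rw [hout] at h2; exact h2
    rcases List.mem_cons.1 hm with rfl | hm
    · exact ⟨hvsub m (by simp [PySem.Set.mem_add]), h⟩
    · rcases ih2 out hout m hm with ⟨h1, h2⟩
      refine ⟨h1, fun hc => h2 ?_⟩
      have := pvDfs_mono g f (g.getD n PySem.Set.empty) (vis.add n) m (by simp [PySem.Set.mem_add, hc])
      rw [e2] at this; exact this

lemma pvDfs_true_expand (g : PySem.Dict String (PySem.Set String)) :
    ∀ f ns vis out, pvDfsA g f ns vis = (true, out) →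
      ∀ u, u ∈ out → u ∉ vis → ∀ v ∈ pvAdj g u, v ∈ out := by
  intro f ns vis
  induction f, ns, vis using pvDfsA.induct g with
  | case1 f vis =>
    intro out hout u hu hunv
    simp [pvDfsA] at hout; subst hout; exact absurd hu hunv
  | case2 head tail vis => intro out hout; simp [pvDfsA] at hout
  | case3 f n rest vis h => intro out hout; simp [pvDfsA, h] at hout
  | case4 f n rest vis h vis' hrun ih =>
    intro out hout
    simp only [pvDfsA, if_neg h, hrun] at hout
    simp at hout
  | case5 f n rest vis h vis' hrun ih1 ih2 =>
    intro out hout u hu hunv v hv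
    have e2 : (pvDfsA g f (g.getD n PySem.Set.empty) (vis.add n)).2 = vis' := by rw [hrun]
    simp only [pvDfsA, if_neg h, hrun] at hout
    have hmono2 : ∀ y, y ∈ vis' → y ∈ out := by
      intro y hy; have := pvDfs_mono g (f+1) rest vis' y hy; rw [hout] at this; exact this
    by_cases huv : u ∈ vis'
    · by_cases hun : u = n
      · subst hun
        exact hmono2 v (pvDfs_true_ns g f (g.getD u PySem.Set.empty) (vis.add u) vis' hrun v hv).1
      · have : u ∉ vis.add n := by simp [PySem.Set.mem_add, hunv, hun]
        exact hmono2 v (ih1 vis' hrun u huv this v hv)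
    · exact ih2 out hout u hu huv v hv

lemma pvDfs_true_s3 (g : PySem.Dict String (PySem.Set String)) :
    ∀ f ns vis out, pvDfsA g f ns vis = (true, out) →
      ∀ u, u ∈ out → u ∉ vis → ∀ v ∈ pvAdj g u, v ∉ vis := by
  intro f ns vis
  induction f, ns, vis using pvDfsA.induct g with
  | case1 f vis =>
    intro out hout u hu hunv
    simp [pvDfsA] at hout; subst hout; exact absurd hu hunv
  | case2 head tail vis => intro out hout; simp [pvDfsA] at hout
  | case3 f n rest vis h => intro out hout; simp [pvDfsA, h] at hout
  | case4 f n rest vis h vis' hrun ih =>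
    intro out hout
    simp only [pvDfsA, if_neg h, hrun] at hout
    simp at hout
  | case5 f n rest vis h vis' hrun ih1 ih2 =>
    intro out hout u hu hunv v hv
    have e2 : (pvDfsA g f (g.getD n PySem.Set.empty) (vis.add n)).2 = vis' := by rw [hrun]
    simp only [pvDfsA, if_neg h, hrun] at hout
    by_cases huv : u ∈ vis'
    · by_cases hun : u = n
      · subst hun
        have := (pvDfs_true_ns g f (g.getD u PySem.Set.empty) (vis.add u) vis' hrun v hv).2
        exact fun hc => this (by simp [PySem.Set.mem_add, hc])
      · have hno : u ∉ vis.add n := by simp [PySem.Set.mem_add, hunv, hun]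
        have := ih1 vis' hrun u huv hno v hv
        exact fun hc => this (by simp [PySem.Set.mem_add, hc])
    · have := ih2 out hout u hu huv v hv
      exact fun hc => this (by
        have h1 := pvDfs_mono g f (g.getD n PySem.Set.empty) (vis.add n) v (by simp [PySem.Set.mem_add, hc])
        rw [e2] at h1; exact h1)

lemma pvDfs_true_s1 (g : PySem.Dict String (PySem.Set String)) :
    ∀ f ns vis out, pvDfsA g f ns vis = (true, out) →
      ∀ v ∈ ns, ∀ u, u ∈ out → u ∉ vis → v ∉ pvAdj g u := by
  intro f ns vis
  induction f, ns, vis using pvDfsA.induct g with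
  | case1 f vis => intro out hout v hv; simp at hv
  | case2 head tail vis => intro out hout; simp [pvDfsA] at hout
  | case3 f n rest vis h => intro out hout; simp [pvDfsA, h] at hout
  | case4 f n rest vis h vis' hrun ih =>
    intro out hout
    simp only [pvDfsA, if_neg h, hrun] at hout
    simp at hout
  | case5 f n rest vis h vis' hrun ih1 ih2 =>
    intro out hout v hvns u hu hunv hvadj
    have e2 : (pvDfsA g f (g.getD n PySem.Set.empty) (vis.add n)).2 = vis' := by rw [hrun]
    simp only [pvDfsA, if_neg h, hrun] at hout
    by_cases huv : u ∈ vis'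
    · by_cases hun : u = n
      · subst hun
        rcases List.mem_cons.1 hvns with hvu | hvr
        · exact (pvDfs_true_ns g f (g.getD u PySem.Set.empty) (vis.add u) vis' hrun v hvadj).2
            (by simp [PySem.Set.mem_add, hvu])
        · have hvmid := (pvDfs_true_ns g f (g.getD u PySem.Set.empty) (vis.add u) vis' hrun v hvadj).1
          exact (pvDfs_true_ns g (f+1) rest vis' out hout v hvr).2 hvmid
      · have hno : u ∉ vis.add n := by simp [PySem.Set.mem_add, hunv, hun]
        rcases List.mem_cons.1 hvns with hvn | hvr
        · exact pvDfs_true_s3 g f (g.getD n PySem.Set.empty) (vis.add n) vis' hrun u huv hno v hvadj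
            (by simp [PySem.Set.mem_add, hvn])
        · have hvmid := pvDfs_true_expand g f (g.getD n PySem.Set.empty) (vis.add n) vis' hrun u huv hno v hvadj
          exact (pvDfs_true_ns g (f+1) rest vis' out hout v hvr).2 hvmid
    · rcases List.mem_cons.1 hvns with hvn | hvr
      · refine pvDfs_true_s3 g (f+1) rest vis' out hout u hu huv v hvadj ?_
        have h1 := pvDfs_mono g f (g.getD n PySem.Set.empty) (vis.add n) v (by simp [PySem.Set.mem_add, hvn])
        rw [e2] at h1; exact h1
      · exact ih2 out hout v hvr u hu huv hvadj

lemma pvDfs_true_noshare (g : PySem.Dict String (PySem.Set String)) :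
    ∀ f ns vis out, pvDfsA g f ns vis = (true, out) →
      ∀ v u₁ u₂, u₁ ∈ out → u₁ ∉ vis → u₂ ∈ out → u₂ ∉ vis →
        v ∈ pvAdj g u₁ → v ∈ pvAdj g u₂ → u₁ = u₂ := by
  intro f ns vis
  induction f, ns, vis using pvDfsA.induct g with
  | case1 f vis =>
    intro out hout v u₁ u₂ h1o h1v _ _ _ _
    simp [pvDfsA] at hout; subst hout; exact absurd h1o h1v
  | case2 head tail vis => intro out hout; simp [pvDfsA] at hout
  | case3 f n rest vis h => intro out hout; simp [pvDfsA, h] at hout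
  | case4 f n rest vis h vis' hrun ih =>
    intro out hout
    simp only [pvDfsA, if_neg h, hrun] at hout
    simp at hout
  | case5 f n rest vis h vis' hrun ih1 ih2 =>
    intro out hout v u₁ u₂ h1o h1v h2o h2v hv1 hv2
    have e2 : (pvDfsA g f (g.getD n PySem.Set.empty) (vis.add n)).2 = vis' := by rw [hrun]
    simp only [pvDfsA, if_neg h, hrun] at hout
    -- helper: a node of adj n is in vis'
    have hchildmid : ∀ w, w ∈ pvAdj g n → w ∈ vis' := fun w hw =>
      (pvDfs_true_ns g f (g.getD n PySem.Set.empty) (vis.add n) vis' hrun w hw).1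
    have hnot3 : ∀ u w, u ∈ out → u ∉ vis' → w ∈ pvAdj g u → w ∉ vis' :=
      fun u w hu huv hw => pvDfs_true_s3 g (f+1) rest vis' out hout u hu huv w hw
    have hcase : ∀ u, u ∈ out → u ∉ vis → u = n ∨ (u ∈ vis' ∧ u ∉ vis.add n) ∨ u ∉ vis' := by
      intro u hu hunv
      by_cases huv : u ∈ vis'
      · by_cases hun : u = n
        · exact Or.inl hun
        · exact Or.inr (Or.inl ⟨huv, by simp [PySem.Set.mem_add, hunv, hun]⟩)
      · exact Or.inr (Or.inr huv)
    -- cross contradictions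
    have hX12 : ∀ u, u ∈ vis' → u ∉ vis.add n → v ∈ pvAdj g n → v ∈ pvAdj g u → False := by
      intro u huv hno hn1 hu1
      exact pvDfs_true_s1 g f (g.getD n PySem.Set.empty) (vis.add n) vis' hrun v hn1 u huv hno hu1
    have hX13 : ∀ u, u ∈ out → u ∉ vis' → v ∈ pvAdj g n → v ∈ pvAdj g u → False := by
      intro u hu huv hn1 hu1
      exact hnot3 u v hu huv hu1 (hchildmid v hn1)
    have hX23 : ∀ w u, w ∈ vis' → w ∉ vis.add n → u ∈ out → u ∉ vis' →
        v ∈ pvAdj g w → v ∈ pvAdj g u → False := by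
      intro w u hwv hwno hu huv hw1 hu1
      have hvmid := pvDfs_true_expand g f (g.getD n PySem.Set.empty) (vis.add n) vis' hrun w hwv hwno v hw1
      exact hnot3 u v hu huv hu1 hvmid
    rcases hcase u₁ h1o h1v with rfl | ⟨hv1', hno1⟩ | hnv1 <;>
      rcases hcase u₂ h2o h2v with h2 | ⟨hv2', hno2⟩ | hnv2
    · exact h2.symm
    · exact (hX12 u₂ hv2' hno2 hv1 hv2).elim
    · exact (hX13 u₂ h2o hnv2 hv1 hv2).elim
    · exact (hX12 u₁ hv1' hno1 (h2 ▸ hv2) hv1).elim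
    · exact ih1 vis' hrun v u₁ u₂ hv1' hno1 hv2' hno2 hv1 hv2
    · exact (hX23 u₁ u₂ hv1' hno1 h2o hnv2 hv1 hv2).elim
    · exact (hX13 u₁ h1o hnv1 (h2 ▸ hv2) hv1).elim
    · exact (hX23 u₂ u₁ hv2' hno2 h1o hnv1 hv2 hv1).elim
    · exact ih2 out hout v u₁ u₂ h1o hnv1 h2o hnv2 hv1 hv2

lemma pvDfs_good (g : PySem.Dict String (PySem.Set String)) (p : PySem.Dict String String)
    (hchild : ∀ u c, c ∈ pvAdj g u → p.get? c = some u) :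
    ∀ f ns vis, (∀ n ∈ ns, PvGood p n) → (∀ v ∈ vis, PvGood p v) →
      ∀ x ∈ (pvDfsA g f ns vis).2, PvGood p x := by
  intro f ns vis
  induction f, ns, vis using pvDfsA.induct g with
  | case1 f vis => intro _ hvis x hx; simp [pvDfsA] at hx; exact hvis x hx
  | case2 head tail vis => intro _ hvis x hx; simp [pvDfsA] at hx; exact hvis x hx
  | case3 f n rest vis h => intro _ hvis x hx; simp [pvDfsA, h] at hx; exact hvis x hx
  | case4 f n rest vis h vis' hrun ih =>
    intro hns hvis x hx
    have e2 : (pvDfsA g f (g.getD n PySem.Set.empty) (vis.add n)).2 = vis' := by rw [hrun]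
    simp only [pvDfsA, if_neg h, hrun] at hx
    have hGn : PvGood p n := hns n (by simp)
    refine ih (fun c hc => PvGood.step c n (hchild n c hc) hGn) (fun y hy => ?_) x (by rw [e2]; exact hx)
    rcases (PySem.Set.mem_add _ _ _).1 hy with hy | rfl
    · exact hvis y hy
    · exact hGn
  | case5 f n rest vis h vis' hrun ih1 ih2 =>
    intro hns hvis x hx
    have e2 : (pvDfsA g f (g.getD n PySem.Set.empty) (vis.add n)).2 = vis' := by rw [hrun]
    simp only [pvDfsA, if_neg h, hrun] at hx
    have hGn : PvGood p n := hns n (by simp)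
    refine ih2 (fun y hy => hns y (by simp [hy])) (fun y hy => ?_) x hx
    refine ih1 (fun c hc => PvGood.step c n (hchild n c hc) hGn) (fun z hz => ?_) y (by rw [e2]; exact hy)
    rcases (PySem.Set.mem_add _ _ _).1 hz with hz | rfl
    · exact hvis z hz
    · exact hGn

lemma pvDfs_true_run (g : PySem.Dict String (PySem.Set String)) (p : PySem.Dict String String)
    (S : List String) (hS : S.Nodup)
    (hadjS : ∀ u x, x ∈ pvAdj g u → x ∈ S)
    (hadjN : ∀ u, (pvAdj g u).Nodup)
    (hchild : ∀ u c, c ∈ pvAdj g u → p.get? c = some u) :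
    ∀ f ns vis, ns.Nodup → (∀ x ∈ ns, x ∈ S) → (∀ x ∈ vis, x ∈ S) → vis.Nodup →
      (∀ x ∈ ns, x ∉ vis) → (∀ x ∈ ns, ∀ u, p.get? x = some u → u ∈ vis) →
      (∀ v ∈ vis, ∀ u, p.get? v = some u → u ∈ vis) →
      S.length + 1 ≤ f + vis.length →
      (pvDfsA g f ns vis).1 = true ∧
      (∀ v ∈ (pvDfsA g f ns vis).2, ∀ u, p.get? v = some u → u ∈ (pvDfsA g f ns vis).2) := by
  intro f ns vis
  induction f, ns, vis using pvDfsA.induct g with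
  | case1 f vis =>
    intro _ _ _ _ _ _ hJvis _
    simpa [pvDfsA] using hJvis
  | case2 head tail vis =>
    intro _ _ hvisS hvisN _ _ _ hfuel
    have := (List.subperm_of_subset hvisN (fun x hx => hvisS x hx)).length_le
    omega
  | case3 f n rest vis h =>
    intro _ _ _ _ hJns2 _ _ _
    exact absurd h (hJns2 n (by simp))
  | case4 f n rest vis h vis' hrun ih =>
    intro hnsN hnsS hvisS hvisN hJns2 hJns3 hJvis hfuel
    have hGn : n ∈ S := hnsS n (by simp)
    have hsub := ih (hadjN n) (fun x hx => hadjS n x hx)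
      (fun x hx => by
        rcases (PySem.Set.mem_add _ _ _).1 hx with hx | rfl
        · exact hvisS x hx
        · exact hGn)
      (PySem.Set.nodup_add vis n hvisN)
      (fun c hc => by
        intro hcv
        rcases (PySem.Set.mem_add _ _ _).1 hcv with hcv | rfl
        · exact h (hJvis c hcv n (hchild n c hc))
        · exact h (hJns3 c (by simp) c (hchild c c hc))
      )
      (fun c hc u hu => by
        have := hchild n c hc
        rw [this] at hu
        cases hu
        simp [PySem.Set.mem_add])
      (fun v hv u hu => by
        rcases (PySem.Set.mem_add _ _ _).1 hv with hv | rfl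
        · exact (PySem.Set.mem_add _ _ _).2 (Or.inl (hJvis v hv u hu))
        · exact (PySem.Set.mem_add _ _ _).2 (Or.inl (hJns3 v (by simp) u hu)))
      (by
        have : (vis.add n).length = vis.length + 1 := by
          rw [PySem.Set.add_of_not_mem h, List.length_append]; simp
        omega)
    rw [hrun] at hsub
    simp at hsub
  | case5 f n rest vis h vis' hrun ih1 ih2 =>
    intro hnsN hnsS hvisS hvisN hJns2 hJns3 hJvis hfuel
    have e2 : (pvDfsA g f (g.getD n PySem.Set.empty) (vis.add n)).2 = vis' := by rw [hrun]
    have hGn : n ∈ S := hnsS n (by simp)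
    have haddN : (vis.add n).Nodup := PySem.Set.nodup_add vis n hvisN
    have haddS : ∀ x ∈ vis.add n, x ∈ S := fun x hx => by
      rcases (PySem.Set.mem_add _ _ _).1 hx with hx | rfl
      · exact hvisS x hx
      · exact hGn
    have hsub1 := ih1 (hadjN n) (fun x hx => hadjS n x hx) haddS haddN
      (fun c hc => by
        intro hcv
        rcases (PySem.Set.mem_add _ _ _).1 hcv with hcv | rfl
        · exact h (hJvis c hcv n (hchild n c hc))
        · exact h (hJns3 c (by simp) c (hchild c c hc))
      )
      (fun c hc u hu => by
        have := hchild n c hc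
        rw [this] at hu
        cases hu
        simp [PySem.Set.mem_add])
      (fun v hv u hu => by
        rcases (PySem.Set.mem_add _ _ _).1 hv with hv | rfl
        · exact (PySem.Set.mem_add _ _ _).2 (Or.inl (hJvis v hv u hu))
        · exact (PySem.Set.mem_add _ _ _).2 (Or.inl (hJns3 v (by simp) u hu)))
      (by
        have : (vis.add n).length = vis.length + 1 := by
          rw [PySem.Set.add_of_not_mem h, List.length_append]; simp
        omega)
    rw [hrun] at hsub1
    -- facts about vis'
    have hvis'S : ∀ x ∈ vis', x ∈ S := fun x hx =>
      pvDfs_subset g S hadjS f (g.getD n PySem.Set.empty) (vis.add n)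
        (fun y hy => hadjS n y hy) haddS x (by rw [e2]; exact hx)
    have hvis'N : vis'.Nodup := e2 ▸ pvDfs_nodup g f (g.getD n PySem.Set.empty) (vis.add n) haddN
    have hmono1 : ∀ y, y ∈ vis.add n → y ∈ vis' := fun y hy =>
      e2 ▸ pvDfs_mono g f (g.getD n PySem.Set.empty) (vis.add n) y hy
    have hrest2 : ∀ x ∈ rest, x ∉ vis' := by
      intro r hr hrv
      rcases pvDfs_entry g f (g.getD n PySem.Set.empty) (vis.add n) r (by rw [e2]; exact hrv)
        with hre | hre | ⟨u, hu1, hu2, hu3⟩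
      · rcases (PySem.Set.mem_add _ _ _).1 hre with hre | rfl
        · exact hJns2 r (by simp [hr]) hre
        · exact (List.nodup_cons.1 hnsN).1 hr
      · exact h (hJns3 r (by simp [hr]) n (hchild n r hre))
      · have := hJns3 r (by simp [hr]) u (hchild u r hu3)
        exact hu2 ((PySem.Set.mem_add _ _ _).2 (Or.inl this))
    have hsub2 := ih2 (List.nodup_cons.1 hnsN).2 (fun x hx => hnsS x (by simp [hx]))
      hvis'S hvis'N hrest2
      (fun x hx u hu => hmono1 u ((PySem.Set.mem_add _ _ _).2 (Or.inl (hJns3 x (by simp [hx]) u hu))))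
      (fun v hv u hu => by
        have h1 := hsub1.2 v hv u hu
        exact h1)
      (by
        have hlen : (vis.add n).length ≤ vis'.length :=
          (List.subperm_of_subset haddN hmono1).length_le
        have : (vis.add n).length = vis.length + 1 := by
          rw [PySem.Set.add_of_not_mem h, List.length_append]; simp
        omega)
    constructor
    · simp only [pvDfsA, if_neg h, hrun]
      exact hsub2.1
    · simp only [pvDfsA, if_neg h, hrun]
      exact hsub2.2

lemma pvDfs_reach (g : PySem.Dict String (PySem.Set String)) (p : PySem.Dict String String)
    (S : List String) (f : Nat) (ns : List String) (out : PySem.Set String)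
    (hrun : pvDfsA g f ns PySem.Set.empty = (true, out))
    (hroots : ∀ v, v ∈ S → p.get? v = none → v ∈ ns)
    (hclosedS : ∀ v u, p.get? v = some u → v ∈ S → u ∈ S)
    (hbridge : ∀ v u, p.get? v = some u → v ∈ pvAdj g u) :
    ∀ v, PvGood p v → v ∈ S → v ∈ out := by
  intro v hg
  induction hg with
  | root v hv =>
    intro hvS
    exact (pvDfs_true_ns g f ns PySem.Set.empty out hrun v (hroots v hvS hv)).1
  | step v u hvu _ ih =>
    intro hvS
    have huS := hclosedS v u hvu hvS
    exact pvDfs_true_expand g f ns PySem.Set.empty out hrun u (ih huS)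
      (by simp [PySem.Set.empty]) v (hbridge v u hvu)

-- ---------- B-side: the chain walk ----------

lemma pvWalk_sound (p : PySem.Dict String String) (ok : PySem.Set String) (n : Nat)
    (hok : ∀ x ∈ ok, PvGood p x) :
    ∀ v steps trail l, pvWalk p ok n v steps trail = some l →
      PvGood p v ∧ (∀ x ∈ l, PvGood p x ∨ x ∈ trail) := by
  intro v steps trail
  induction v, steps, trail using pvWalk.induct p ok n with
  | case1 v steps trail hnone =>
    intro l hl
    rw [pvWalk] at hl
    simp only [hnone] at hl
    cases hl
    refine ⟨PvGood.root v hnone, ?_⟩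
    intro x hx
    rcases List.mem_cons.1 hx with rfl | hx
    · exact Or.inl (PvGood.root x hnone)
    · exact Or.inr hx
  | case2 v steps trail u hsome hvok =>
    intro l hl
    rw [pvWalk] at hl
    simp only [hsome, if_pos hvok] at hl
    cases hl
    refine ⟨hok v hvok, ?_⟩
    intro x hx
    rcases List.mem_cons.1 hx with rfl | hx
    · exact Or.inl (hok x hvok)
    · exact Or.inr hx
  | case3 v steps trail u hsome hnok hbig =>
    intro l hl
    rw [pvWalk] at hl
    simp only [hsome, if_neg hnok, if_pos hbig] at hl
    exact absurd hl (by simp)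
  | case4 v steps trail u hsome hnok hbig ih =>
    intro l hl
    rw [pvWalk] at hl
    simp only [hsome, if_neg hnok, if_neg hbig] at hl
    rcases ih l hl with ⟨hgu, hrest⟩
    have hgv : PvGood p v := PvGood.step v u hsome hgu
    refine ⟨hgv, ?_⟩
    intro x hx
    rcases hrest x hx with hx | hx
    · exact Or.inl hx
    · rcases List.mem_cons.1 hx with rfl | hx
      · exact Or.inl hgv
      · exact Or.inr hx

lemma pvWalk_complete (p : PySem.Dict String String) (ok : PySem.Set String)
    (N : List String) (hN : N.Nodup)
    (hclosed : ∀ x u, p.get? x = some u → u ∈ N) :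
    ∀ v steps trail, PvGood p v → v ∈ N →
      trail.Nodup → (∀ x ∈ trail, x ∈ N) → v ∉ trail → steps = trail.length →
      (∀ j (hj : j < trail.length), pvChain p (j+1) trail[j] = some v) →
      (pvWalk p ok N.length v steps trail).isSome := by
  intro v steps trail
  induction v, steps, trail using pvWalk.induct p ok N.length with
  | case1 v steps trail hnone =>
    intro _ _ _ _ _ _ _
    rw [pvWalk]; simp [hnone]
  | case2 v steps trail u hsome hvok =>
    intro _ _ _ _ _ _ _
    rw [pvWalk]; simp [hsome, hvok]
  | case3 v steps trail u hsome hnok hbig =>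
    intro _ hvN htN htsub hvt hsteps _
    have hcons : (v :: trail).Nodup := List.nodup_cons.2 ⟨hvt, htN⟩
    have hsubN : ∀ x ∈ v :: trail, x ∈ N := by
      intro x hx
      rcases List.mem_cons.1 hx with rfl | hx
      · exact hvN
      · exact htsub x hx
    have := (List.subperm_of_subset hcons hsubN).length_le
    simp at this
    omega
  | case4 v steps trail u hsome hnok hbig ih =>
    intro hgv hvN htN htsub hvt hsteps hlink
    have hgu : PvGood p u := by
      cases hgv with
      | root _ hr => rw [hr] at hsome; cases hsome
      | step _ u' hs hg => rw [hs] at hsome; cases hsome; exact hg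
    have hchain1 : pvChain p 1 v = some u := by simp [pvChain, hsome]
    have hunotin : u ∉ v :: trail := by
      intro hu
      rcases List.mem_cons.1 hu with rfl | hu
      · exact pvGood_no_cycle hgv 1 (by omega) hchain1
      · rcases List.mem_iff_getElem.1 hu with ⟨j, hj, hje⟩
        have hl := hlink j hj
        have : pvChain p (j+2) trail[j] = some u := by
          rw [show j+2 = (j+1)+1 from rfl, pvChain_succ_right]
          simp [hl, hsome]
        rw [hje] at this
        exact pvGood_no_cycle hgu (j+2) (by omega) this
    rw [pvWalk]
    simp only [hsome, if_neg hnok, if_neg hbig]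
    refine ih hgu (hclosed v u hsome) (List.nodup_cons.2 ⟨hvt, htN⟩)
      (fun x hx => by
        rcases List.mem_cons.1 hx with rfl | hx
        · exact hvN
        · exact htsub x hx) hunotin (by simp [hsteps]) ?_
    intro j hj
    cases j with
    | zero => simpa using hchain1
    | succ j =>
      have hj' : j < trail.length := by simpa using hj
      have hl := hlink j hj'
      have : pvChain p (j+2) trail[j] = some u := by
        rw [show j+2 = (j+1)+1 from rfl, pvChain_succ_right]
        simp [hl, hsome]
      simpa using this

lemma pvCheckAll_iff (p : PySem.Dict String String) (N : List String) (hN : N.Nodup)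
    (hclosed : ∀ x u, p.get? x = some u → u ∈ N) :
    ∀ vs ok, (∀ x ∈ vs, x ∈ N) → (∀ x ∈ ok, PvGood p x) →
      (pvCheckAll p N.length vs ok = true ↔ ∀ v ∈ vs, PvGood p v) := by
  intro vs
  induction vs with
  | nil => intro ok _ _; simp [pvCheckAll]
  | cons v rest ih =>
    intro ok hvsN hokG
    rw [pvCheckAll]
    cases hwalk : pvWalk p ok N.length v 0 [] with
    | none =>
      simp only []
      constructor
      · intro hfalse; cases hfalse
      · intro hall
        have hgv := hall v (by simp)
        have := pvWalk_complete p ok N hN hclosed v 0 [] hgv (hvsN v (by simp))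
          (by simp) (by simp) (by simp) (by simp) (by intro j hj; simp at hj)
        rw [hwalk] at this
        cases this
    | some trail =>
      simp only []
      rcases pvWalk_sound p ok N.length hokG v 0 [] trail hwalk with ⟨hgv, htrail⟩
      have hokG' : ∀ x ∈ ok.update trail, PvGood p x := by
        intro x hx
        rcases (PySem.Set.mem_update _ _ _).1 hx with hx | hx
        · exact hokG x hx
        · rcases htrail x hx with hx | hx
          · exact hx
          · simp at hx
      rw [ih (ok.update trail) (fun x hx => hvsN x (by simp [hx])) hokG']
      constructor
      · intro hall x hx
        rcases List.mem_cons.1 hx with rfl | hx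
        · exact hgv
        · exact hall x hx
      · intro hall x hx
        exact hall x (by simp [hx])

-- ---------- assembly ----------

lemma pvGood_has_root (p : PySem.Dict String String) (S : List String)
    (hclosed : ∀ v u, p.get? v = some u → u ∈ S) :
    ∀ v, PvGood p v → v ∈ S → ∃ r ∈ S, p.get? r = none := by
  intro v hg
  induction hg with
  | root v hv => intro hvS; exact ⟨v, hvS, hv⟩
  | step v u hvu _ ih => intro _; exact ih (hclosed v u hvu)

lemma pv_main (edges : List (String × String)) :
    is_valid_forest edges = is_valid_forest_alt edges := by
  classical
  obtain ⟨hndA, hadjN, hmemA0, hndsA0, hinA, hdegA0⟩ :=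
    pvFoldA_main edges PySem.Dict.empty PySem.Dict.empty PySem.Set.empty
      List.nodup_nil
      (by intro u; simp [pvAdj, PySem.Dict.getD_empty, PySem.Set.empty])
      (by intro u v hv; simp [pvAdj, PySem.Dict.getD_empty, PySem.Set.empty] at hv)
      (by intro v; simp [PySem.Dict.getD_empty])
      (by
        intro v
        constructor
        · intro _ u hv; simp [pvAdj, PySem.Dict.getD_empty, PySem.Set.empty] at hv
        · intro _; simp [PySem.Dict.getD_empty])
  set stA := edges.foldl pvStepA (PySem.Dict.empty, PySem.Dict.empty, PySem.Set.empty) with hstA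
  have hmemA : ∀ u v, v ∈ pvAdj stA.1 u ↔ (u, v) ∈ edges := by
    intro u v
    rw [hmemA0 u v]
    simp [pvAdj, PySem.Dict.getD_empty, PySem.Set.empty]
  have hndsA : ∀ v, v ∈ stA.2.2 ↔ ∃ e ∈ edges, v = e.1 ∨ v = e.2 := by
    intro v
    rw [hndsA0 v]
    simp [PySem.Set.empty]
  have hdegA : ∀ v, stA.2.1.getD v 0 = 0 ↔ ∀ u, (u, v) ∉ edges := by
    intro v
    rw [hdegA0 v]
    constructor
    · intro h u hc; exact h u ((hmemA u v).2 hc)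
    · intro h u hc; exact h u ((hmemA u v).1 hc)
  have houtsub : ∀ f ns (h : ∀ x ∈ ns, x ∈ stA.2.2), ∀ x ∈ (pvDfsA stA.1 f ns PySem.Set.empty).2, x ∈ stA.2.2 := by
    intro f ns hns
    exact pvDfs_subset stA.1 stA.2.2 (fun u x hx => (hinA u x hx).2) f ns PySem.Set.empty hns
      (by intro x hx; simp [PySem.Set.empty] at hx)
  -- the roots list
  set rootsA : PySem.Set String := stA.2.2.filter (fun v => stA.2.1.getD v 0 == 0) with hroots
  have hrootsmem : ∀ v, v ∈ rootsA ↔ v ∈ stA.2.2 ∧ stA.2.1.getD v 0 = 0 := by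
    intro v
    rw [hroots, List.mem_filter]
    simp
  have hrootsnd : rootsA.Nodup := hndA.filter _
  have hrootssub : ∀ x ∈ rootsA, x ∈ stA.2.2 := fun x hx => ((hrootsmem x).1 hx).1
  have hNDlen : stA.2.2.length ≤ 2 * edges.length := by
    have hsubEP : ∀ v ∈ stA.2.2, v ∈ edges.flatMap (fun e => [e.1, e.2]) := by
      intro v hv
      rcases (hndsA v).1 hv with ⟨e, he, hor⟩
      exact List.mem_flatMap.2 ⟨e, he, by rcases hor with h | h <;> simp [h]⟩
    have hEPlen : ∀ es : List (String × String), (es.flatMap fun e => [e.1, e.2]).length = 2 * es.length := by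
      intro es
      induction es with
      | nil => simp
      | cons e r ih => simp only [List.flatMap_cons, List.length_append, List.length_cons, List.length_nil, ih]; omega
    calc stA.2.2.length ≤ (edges.flatMap fun e => [e.1, e.2]).length :=
          (List.subperm_of_subset hndA hsubEP).length_le
      _ = 2 * edges.length := hEPlen edges
  -- B-side build
  cases hB : pvBuildB edges PySem.Dict.empty PySem.Set.empty with
  | none =>
    -- not unique parents: both sides are false
    rcases (pvBuildB_main edges PySem.Dict.empty PySem.Set.empty List.nodup_nil).1 hB
      with ⟨x, y, c, hne, hxc, hor⟩
    have hyc : (y, c) ∈ edges := by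
      rcases hor with h | h
      · rw [PySem.Dict.get?_empty] at h; cases h
      · exact h
    have hRHS : is_valid_forest_alt edges = false := by
      rw [is_valid_forest_alt, hB]
    rw [hRHS]
    rw [is_valid_forest]
    simp only [← hstA, ← hroots]
    by_cases hre : rootsA.isEmpty
    · simp [hre]
    · simp only [hre, Bool.false_eq_true, if_false]
      cases hrun : pvDfsA stA.1 (2 * edges.length + 2) rootsA PySem.Set.empty with
      | mk b out =>
        cases b with
        | false => rfl
        | true =>
          simp only []
          have houtN : out.Nodup := by
            have := pvDfs_nodup stA.1 (2 * edges.length + 2) rootsA PySem.Set.empty List.nodup_nil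
            rw [hrun] at this; exact this
          have houts : ∀ z ∈ out, z ∈ stA.2.2 := by
            have := houtsub (2 * edges.length + 2) rootsA hrootssub
            rw [hrun] at this; exact this
          rw [beq_eq_false_iff_ne]
          intro hlen
          have hperm : ∀ z ∈ stA.2.2, z ∈ out :=
            fun z hz => ((List.subperm_of_subset houtN houts).perm_of_length_le (le_of_eq hlen.symm)).mem_iff.mpr hz
          have hxout : x ∈ out := hperm x ((hndsA x).2 ⟨(x, c), hxc, Or.inl rfl⟩)
          have hyout : y ∈ out := hperm y ((hndsA y).2 ⟨(y, c), hyc, Or.inl rfl⟩)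
          exact hne (pvDfs_true_noshare stA.1 (2 * edges.length + 2) rootsA PySem.Set.empty out hrun
            c x y hxout (by simp [PySem.Set.empty]) hyout (by simp [PySem.Set.empty])
            ((hmemA x c).2 hxc) ((hmemA y c).2 hyc))
  | some r =>
    rcases r with ⟨P, NDB⟩
    rcases (pvBuildB_main edges PySem.Dict.empty PySem.Set.empty List.nodup_nil).2 P NDB hB
      with ⟨c1, c2, _, c3, c4⟩
    have c2' : ∀ b a, P.get? b = some a → (a, b) ∈ edges := by
      intro b a h
      rcases c2 b a h with h | h
      · rw [PySem.Dict.get?_empty] at h; cases h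
      · exact h
    have c3' : ∀ v, v ∈ NDB ↔ ∃ e ∈ edges, v = e.1 ∨ v = e.2 := by
      intro v
      rw [c3 v]
      simp [PySem.Set.empty]
    have hndtrans : ∀ v, v ∈ NDB ↔ v ∈ stA.2.2 := by
      intro v; rw [c3' v, hndsA v]
    have hchild : ∀ u c, c ∈ pvAdj stA.1 u → P.get? c = some u :=
      fun u c hc => c1 u c ((hmemA u c).1 hc)
    have hbridge : ∀ v u, P.get? v = some u → v ∈ pvAdj stA.1 u :=
      fun v u h => (hmemA u v).2 (c2' v u h)
    have hdegP : ∀ v, stA.2.1.getD v 0 = 0 ↔ P.get? v = none := by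
      intro v
      rw [hdegA v]
      constructor
      · intro h
        cases hp : P.get? v with
        | none => rfl
        | some u => exact absurd (c2' v u hp) (h u)
      · intro h u hc
        rw [c1 u v hc] at h; cases h
    have hclosedN : ∀ x u, P.get? x = some u → u ∈ NDB :=
      fun x u h => (c3' u).2 ⟨(u, x), c2' x u h, Or.inl rfl⟩
    have hclosedND : ∀ x u, P.get? x = some u → x ∈ stA.2.2 → u ∈ stA.2.2 :=
      fun x u h _ => (hndtrans u).1 (hclosedN x u h)
    have hRHS : is_valid_forest_alt edges =
        (if NDB.isEmpty then false else pvCheckAll P NDB.length NDB PySem.Set.empty) := by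
      rw [is_valid_forest_alt, hB]
    by_cases hNDe : NDB.isEmpty
    · -- no nodes at all: both false
      have hND : ∀ v, v ∉ stA.2.2 := by
        intro v hv
        rw [List.isEmpty_iff] at hNDe
        have := (hndtrans v).2 hv
        rw [hNDe] at this
        simp at this
      have hrootsE : rootsA.isEmpty := by
        rw [List.isEmpty_iff]
        rw [List.eq_nil_iff_forall_not_mem]
        intro v hv
        exact hND v (hrootssub v hv)
      rw [hRHS]
      simp only [hNDe, if_true]
      rw [is_valid_forest]
      simp only [← hstA, ← hroots]
      simp [hrootsE]
    · -- some nodes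
      rw [hRHS]
      simp only [hNDe, Bool.false_eq_true, if_false]
      have hCheck := pvCheckAll_iff P NDB c4 hclosedN NDB PySem.Set.empty
        (fun x hx => hx) (by intro x hx; simp [PySem.Set.empty] at hx)
      rw [Bool.eq_iff_iff]
      rw [hCheck]
      rw [is_valid_forest]
      simp only [← hstA, ← hroots]
      by_cases hre : rootsA.isEmpty
      · -- A returns false; show not all nodes are good
        simp only [hre, if_true]
        constructor
        · intro h; cases h
        · intro hall
          rcases List.exists_mem_of_ne_nil NDB (by
            intro hc; rw [hc] at hNDe; simp at hNDe) with ⟨v0, hv0⟩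
          rcases pvGood_has_root P NDB hclosedN v0 (hall v0 hv0) hv0 with ⟨rt, hrtN, hrtnone⟩
          have : rt ∈ rootsA := (hrootsmem rt).2 ⟨(hndtrans rt).1 hrtN, (hdegP rt).2 hrtnone⟩
          rw [List.isEmpty_iff] at hre
          rw [hre] at this
          simp at this
      · -- A runs the DFS; it returns true and visits exactly the good nodes
        simp only [hre, Bool.false_eq_true, if_false]
        have hJns3 : ∀ x ∈ rootsA, ∀ u, P.get? x = some u → u ∈ (PySem.Set.empty : PySem.Set String) := by
          intro x hx u hu
          have := (hdegP x).1 ((hrootsmem x).1 hx).2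
          rw [this] at hu; cases hu
        have hTR := pvDfs_true_run stA.1 P stA.2.2 hndA (fun u x hx => (hinA u x hx).2) hadjN hchild
          (2 * edges.length + 2) rootsA PySem.Set.empty hrootsnd hrootssub
          (by intro x hx; simp [PySem.Set.empty] at hx) List.nodup_nil
          (by intro x _ hx; simp [PySem.Set.empty] at hx)
          hJns3
          (by intro v hv; simp [PySem.Set.empty] at hv)
          (by have := hNDlen; simp only [PySem.Set.empty, List.length_nil]; omega)
        cases hrun : pvDfsA stA.1 (2 * edges.length + 2) rootsA PySem.Set.empty with
        | mk b out =>
          rw [hrun] at hTR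
          cases b with
          | false => simp at hTR
          | true =>
            simp only []
            have houtN : out.Nodup := by
              have := pvDfs_nodup stA.1 (2 * edges.length + 2) rootsA PySem.Set.empty List.nodup_nil
              rw [hrun] at this; exact this
            have houts : ∀ z ∈ out, z ∈ stA.2.2 := by
              have := houtsub (2 * edges.length + 2) rootsA hrootssub
              rw [hrun] at this; exact this
            have houtgood : ∀ z ∈ out, PvGood P z := by
              have := pvDfs_good stA.1 P hchild (2 * edges.length + 2) rootsA PySem.Set.empty
                (by
                  intro n hn
                  exact PvGood.root n ((hdegP n).1 ((hrootsmem n).1 hn).2))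
                (by intro v hv; simp [PySem.Set.empty] at hv)
              rw [hrun] at this; exact this
            have hreach : ∀ v, PvGood P v → v ∈ stA.2.2 → v ∈ out :=
              pvDfs_reach stA.1 P stA.2.2 (2 * edges.length + 2) rootsA out hrun
                (fun v hvS hvnone => (hrootsmem v).2 ⟨hvS, (hdegP v).2 hvnone⟩)
                hclosedND hbridge
            rw [beq_iff_eq]
            constructor
            · intro hlen v hv
              have hperm : ∀ z ∈ stA.2.2, z ∈ out :=
                fun z hz => ((List.subperm_of_subset houtN houts).perm_of_length_le (le_of_eq hlen.symm)).mem_iff.mpr hz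
              exact houtgood v (hperm v ((hndtrans v).1 hv))
            · intro hall
              have hsup : ∀ z ∈ stA.2.2, z ∈ out := by
                intro z hz
                exact hreach z (hall z ((hndtrans z).2 hz)) hz
              have h1 := (List.subperm_of_subset houtN houts).length_le
              have h2 := (List.subperm_of_subset hndA hsup).length_le
              omega

-- ===== VERDICT (by name: the statement is the Claim_ definition above) =====
theorem is_valid_forest_spec : Claim_equal_is_valid_forest := by
  intro edges _
  unfold Spec_is_valid_forest
  exact pv_main edges
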